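-- pv_equiv track=rewrite | github.com/igrr/argparse_to_md | argparse_to_md/formatter.py | _wrap_usage_line
-- ===== SOURCE A (Python) =====
-- import typing as t
--
-- def _wrap_usage_line(prog: str, parts: t.List[str], width: int) -> str:
--     if not parts:
--         return prog
--
--     single_line = prog + " " + " ".join(parts)
--     if len(single_line) <= width:
--         return single_line
--
--     continuation_indent = " " * (len(prog) + 1)
--     lines: t.List[str] = []
--     current_line = prog
--
--     for part in parts:
--         candidate = current_line + " " + part
--         if len(candidate) <= width or current_line == prog:
--             current_line = candidate
--         else:
--             lines.append(current_line)
--             current_line = continuation_indent + part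
--
--     if current_line.strip():
--         lines.append(current_line)
--
--     return "\n".join(lines)
-- ===== SOURCE B (Python) =====
-- import typing as t
--
-- def _last_le(cum: t.List[int], limit: int, lo: int, hi: int) -> int:
--     # largest m in [lo, hi] with cum[m] <= limit (cum is strictly increasing); lo if none
--     while lo < hi:
--         mid = (lo + hi + 1) // 2
--         if cum[mid] <= limit:
--             lo = mid
--         else:
--             hi = mid - 1
--     return lo
--
-- def _wrap_usage_line(prog: str, parts: t.List[str], width: int) -> str:
--     if not parts:
--         return prog
--
--     n = len(parts)
--     cum = [0]
--     for p in parts: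
--         cum.append(cum[-1] + len(p) + 1)
--     # a line holding parts[i:m] has length len(prog) + cum[m] - cum[i]
--     if len(prog) + cum[n] <= width:
--         return prog + " " + " ".join(parts)
--
--     budget = width - len(prog)
--     breaks = []
--     i = 0
--     while i < n:
--         m = max(_last_le(cum, budget + cum[i], i, n), i + 1)
--         breaks.append((i, m))
--         i = m
--
--     indent = " " * (len(prog) + 1)
--     lines = [prog + " " + " ".join(parts[breaks[0][0]:breaks[0][1]])]
--     lines += [indent + " ".join(parts[i:m]) for (i, m) in breaks[1:]]
--     if not lines[-1].strip():
--         lines.pop()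
--     return "\n".join(lines)
-- ===== Notes on version B (the rewrite author's own statement) =====
-- stated objective: alternative
-- what changed: A grows line strings part by part in one greedy loop; B precomputes prefix sums of part lengths and finds each line break by a hand-written binary search over them (each line covers parts[i:m] with m the largest index whose cumulative length still fits, forced to at least i+1), then renders the slices and drops a whitespace-only last line.
import Mathlib
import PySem

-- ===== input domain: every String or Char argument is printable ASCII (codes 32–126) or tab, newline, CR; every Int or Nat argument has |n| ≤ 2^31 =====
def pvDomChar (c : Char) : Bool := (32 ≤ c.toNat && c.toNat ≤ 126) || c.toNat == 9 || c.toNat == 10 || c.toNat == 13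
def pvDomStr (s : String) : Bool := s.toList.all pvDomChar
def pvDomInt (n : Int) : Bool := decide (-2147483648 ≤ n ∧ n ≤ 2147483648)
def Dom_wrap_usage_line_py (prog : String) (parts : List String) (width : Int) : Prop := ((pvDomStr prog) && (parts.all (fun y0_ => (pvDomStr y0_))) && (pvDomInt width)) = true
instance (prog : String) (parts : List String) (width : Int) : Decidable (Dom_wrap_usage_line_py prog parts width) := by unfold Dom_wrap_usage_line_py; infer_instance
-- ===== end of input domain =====

-- B replaces A's greedy loop over growing line strings by prefix sums of the part lengths
-- plus a binary search locating each line break (alternative algorithm, similar cost).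

-- ===== PORT A =====
def wrap_usage_line_py (prog : String) (parts : List String) (width : Int) : String :=
  if parts.isEmpty then prog
  else
    let single_line := prog ++ " " ++ PySem.Str.join " " parts
    if PySem.Str.len single_line ≤ width then single_line
    else
      let continuation_indent := String.ofList (List.replicate (prog.toList.length + 1) ' ')
      let st := parts.foldl (fun (st : List String × String) part =>
          let candidate := st.2 ++ " " ++ part
          if PySem.Str.len candidate ≤ width ∨ st.2 = prog then (st.1, candidate)
          else (st.1 ++ [st.2], continuation_indent ++ part))
        ([], prog)
      let lines := if PySem.Str.strip st.2 ≠ "" then st.1 ++ [st.2] else st.1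
      PySem.Str.join "\n" lines

-- ===== PORT B =====
-- _last_le: largest m in [lo, hi] with cum[m] <= limit (cum strictly increasing); lo if none
-- (fuel = hi - lo is a pure totality device: the loop halves hi - lo each turn)
def pvLastLeAux (cum : List Int) (limit : Int) : Nat → Nat → Nat → Nat
  | 0, lo, _ => lo
  | fuel + 1, lo, hi =>
    if lo < hi then
      if cum.getD ((lo + hi + 1) / 2) 0 ≤ limit then pvLastLeAux cum limit fuel ((lo + hi + 1) / 2) hi
      else pvLastLeAux cum limit fuel lo ((lo + hi + 1) / 2 - 1)
    else lo

def pvLastLe (cum : List Int) (limit : Int) (lo hi : Nat) : Nat :=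
  pvLastLeAux cum limit (hi - lo) lo hi

-- the `while i < n` loop collecting the (i, m) break pairs (fuel = n - i: i grows each turn)
def pvMkBreaksAux (cum : List Int) (budget : Int) (n : Nat) : Nat → Nat → List (Nat × Nat)
  | 0, _ => []
  | fuel + 1, i =>
    if i < n then
      (i, max (pvLastLe cum (budget + cum.getD i 0) i n) (i + 1)) ::
        pvMkBreaksAux cum budget n fuel (max (pvLastLe cum (budget + cum.getD i 0) i n) (i + 1))
    else []

def pvMkBreaks (cum : List Int) (budget : Int) (n : Nat) (i : Nat) : List (Nat × Nat) :=
  pvMkBreaksAux cum budget n (n - i) i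

def wrap_usage_line_py_alt (prog : String) (parts : List String) (width : Int) : String :=
  if parts.isEmpty then prog
  else
    let n := parts.length
    let cum := parts.foldl (fun acc p => acc ++ [acc.getLastD 0 + PySem.Str.len p + 1]) [0]
    -- a line holding parts[i:m] has length len(prog) + cum[m] - cum[i]
    if PySem.Str.len prog + cum.getD n 0 ≤ width then
      prog ++ " " ++ PySem.Str.join " " parts
    else
      let budget := width - PySem.Str.len prog
      let breaks := pvMkBreaks cum budget n 0
      let indent := String.ofList (List.replicate (prog.toList.length + 1) ' ')
      let lines : List String :=
        match breaks with
        | [] => []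
        | b0 :: bs =>
          (prog ++ " " ++ PySem.Str.join " " (PySem.List.slice parts (some (b0.1 : Int)) (some (b0.2 : Int)))) ::
          bs.map (fun b => indent ++ PySem.Str.join " " (PySem.List.slice parts (some (b.1 : Int)) (some (b.2 : Int))))
      let lines := if PySem.Str.strip (lines.getLastD "") = "" then lines.dropLast else lines
      PySem.Str.join "\n" lines

-- ===== PRECONDITION & SPEC =====
def Spec_wrap_usage_line_py (prog : String) (parts : List String) (width : Int) (out : String) : Prop := out = wrap_usage_line_py_alt prog parts width
instance (prog : String) (parts : List String) (width : Int) (out : String) : Decidable (Spec_wrap_usage_line_py prog parts width out) := by unfold Spec_wrap_usage_line_py; infer_instance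

-- ===== CLAIM (what is proved, stated in full; the proofs are below) =====
def Claim_equal_wrap_usage_line_py : Prop := ∀ (prog : String) (parts : List String) (width : Int), Dom_wrap_usage_line_py prog parts width → Spec_wrap_usage_line_py prog parts width (wrap_usage_line_py prog parts width)

-- ===== LEMMAS AND PROOFS =====

-- cumulative length function: pvC parts k = sum of (len p + 1) over the first k parts
def pvC (parts : List String) (k : Nat) : Int :=
  ((parts.take k).map (fun p => PySem.Str.len p + 1)).sum

-- the tail of the cum list built by B's loop
def pvScan (s : Int) : List String → List Int
  | [] => []
  | p :: ps => (s + PySem.Str.len p + 1) :: pvScan (s + PySem.Str.len p + 1) ps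

-- B's grouping step, abstracting A's loop state to (done groups, current group, current length)
def pvStep (prog : String) (width : Int) (st : List (List String) × List String × Int) (part : String) :
    List (List String) × List String × Int :=
  if st.2.2 + 1 + PySem.Str.len part ≤ width then (st.1, st.2.1 ++ [part], st.2.2 + 1 + PySem.Str.len part)
  else (st.1 ++ [st.2.1], [part], PySem.Str.len prog + 1 + PySem.Str.len part)

-- rendering of a group list
def pvRender (prog indent : String) (groups : List (List String)) : List String :=
  match groups with
  | [] => []
  | g0 :: gs => (prog ++ " " ++ PySem.Str.join " " g0) :: gs.map (fun g => indent ++ PySem.Str.join " " g)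

-- the current line A holds, as a function of the abstract state
def pvLine (prog indent : String) (done : List (List String)) (g : List String) : String :=
  if done = [] then prog ++ " " ++ PySem.Str.join " " g else indent ++ PySem.Str.join " " g

lemma chars_join_append (sep c : List Char) (l : List (List Char)) (hl : l ≠ []) :
    PySem.Chars.join sep (l ++ [c]) = PySem.Chars.join sep l ++ sep ++ c := by
  induction l with
  | nil => exact absurd rfl hl
  | cons x t ih =>
    cases t with
    | nil => simp [PySem.Chars.join_cons_cons, PySem.Chars.join_singleton]
    | cons y u =>
      have := ih (by simp)
      simp only [List.cons_append, PySem.Chars.join_cons_cons] at *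
      simp [this, List.append_assoc]

lemma str_join_append (sep p : String) (g : List String) (hg : g ≠ []) :
    PySem.Str.join sep (g ++ [p]) = PySem.Str.join sep g ++ sep ++ p := by
  apply String.toList_injective
  simp [PySem.Str.toList_join, chars_join_append sep.toList p.toList (g.map String.toList) (by simpa using hg)]

lemma str_join_singleton (sep p : String) : PySem.Str.join sep [p] = p := by
  apply String.toList_injective
  simp [PySem.Str.toList_join, PySem.Chars.join_singleton]

lemma pvRender_append (prog indent : String) (done : List (List String)) (g : List String) :
    pvRender prog indent (done ++ [g]) = pvRender prog indent done ++ [pvLine prog indent done g] := by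
  cases done with
  | nil => simp [pvRender, pvLine]
  | cons g0 gs => simp [pvRender, pvLine]

lemma pvLine_len (prog indent : String) (hind : indent.toList.length = prog.toList.length + 1)
    (done : List (List String)) (g : List String) :
    (pvLine prog indent done g).toList.length = prog.toList.length + 1 + (PySem.Str.join " " g).toList.length := by
  unfold pvLine; split <;> simp [hind] <;> omega

lemma pvLine_ne_prog (prog indent : String) (hind : indent.toList.length = prog.toList.length + 1)
    (done : List (List String)) (g : List String) :
    pvLine prog indent done g ≠ prog := by
  intro h
  have := congrArg (fun s => s.toList.length) h
  simp only [pvLine_len prog indent hind] at this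
  omega

-- A's fold over line strings equals the abstract grouping fold (pvStep)
lemma loop_eq (prog indent : String) (width : Int)
    (hind : indent.toList.length = prog.toList.length + 1) :
    ∀ (rest : List String) (done : List (List String)) (g : List String), g ≠ [] →
    rest.foldl (fun (st : List String × String) part =>
        let candidate := st.2 ++ " " ++ part
        if PySem.Str.len candidate ≤ width ∨ st.2 = prog then (st.1, candidate)
        else (st.1 ++ [st.2], indent ++ part))
      (pvRender prog indent done, pvLine prog indent done g)
    = (fun st : List (List String) × List String × Int =>
        (pvRender prog indent st.1, pvLine prog indent st.1 st.2.1))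
       (rest.foldl (pvStep prog width)
        (done, g, ((pvLine prog indent done g).toList.length : Int))) := by
  intro rest
  induction rest with
  | nil => intro done g hg; simp
  | cons part rest ih =>
    intro done g hg
    simp only [List.foldl_cons, pvStep]
    by_cases hc : ((pvLine prog indent done g).toList.length : Int) + 1 + PySem.Str.len part ≤ width
    · have hA : PySem.Str.len (pvLine prog indent done g ++ " " ++ part) ≤ width := by
        simp only [PySem.Str.len_eq, String.toList_append, List.length_append] at *
        push_cast at *
        simp at hc ⊢
        omega
      have hcand : pvLine prog indent done g ++ " " ++ part = pvLine prog indent done (g ++ [part]) := by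
        unfold pvLine
        split <;> rw [str_join_append " " part g hg] <;> simp [String.append_assoc]
      have hlen : ((pvLine prog indent done g).toList.length : Int) + 1 + PySem.Str.len part
          = ((pvLine prog indent done (g ++ [part])).toList.length : Int) := by
        rw [← hcand]; simp [PySem.Str.len_eq]; push_cast; ring
      rw [if_pos (Or.inl hA), if_pos hc, hcand, hlen]
      exact ih done (g ++ [part]) (by simp)
    · have hA : ¬ (PySem.Str.len (pvLine prog indent done g ++ " " ++ part) ≤ width ∨ pvLine prog indent done g = prog) := by
        rintro (h | h)
        · apply hc
          simp only [PySem.Str.len_eq, String.toList_append, List.length_append] at *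
          push_cast at *
          simp at h hc ⊢
          omega
        · exact pvLine_ne_prog prog indent hind done g h
      have hline : indent ++ part = pvLine prog indent (done ++ [g]) [part] := by
        simp [pvLine, str_join_singleton]
      have hcur : PySem.Str.len prog + 1 + PySem.Str.len part
          = ((pvLine prog indent (done ++ [g]) [part]).toList.length : Int) := by
        rw [← hline]
        simp only [PySem.Str.len_eq, String.toList_append, List.length_append, hind]
        push_cast
        ring
      rw [if_neg hA, if_neg hc, ← pvRender_append, hline, hcur]
      exact ih (done ++ [g]) [part] (by simp)

-- B's cum-building fold produces [0] followed by the running sums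
lemma foldl_cum : ∀ (ps : List String) (acc : List Int), acc ≠ [] →
    ps.foldl (fun acc p => acc ++ [acc.getLastD 0 + PySem.Str.len p + 1]) acc
      = acc ++ pvScan (acc.getLastD 0) ps := by
  intro ps
  induction ps with
  | nil => intro acc h; simp [pvScan]
  | cons p tl ih =>
    intro acc h
    simp only [List.foldl_cons]
    rw [ih (acc ++ [acc.getLastD 0 + PySem.Str.len p + 1]) (by simp)]
    simp [pvScan]

lemma pvScan_getD : ∀ (ps : List String) (s : Int) (k : Nat), k < ps.length →
    (pvScan s ps).getD k 0 = s + pvC ps (k + 1) := by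
  intro ps
  induction ps with
  | nil => intro s k h; simp at h
  | cons p tl ih =>
    intro s k h
    cases k with
    | zero => simp [pvScan, pvC]; ring
    | succ k =>
      simp only [pvScan, List.getD_cons_succ]
      rw [ih (s + PySem.Str.len p + 1) k (by simpa using h)]
      simp [pvC, List.take_succ_cons]
      ring

lemma pvC_succ (parts : List String) (k : Nat) (h : k < parts.length) :
    pvC parts (k + 1) = pvC parts k + (PySem.Str.len parts[k] + 1) := by
  have hs := List.sum_take_succ (parts.map (fun p => PySem.Str.len p + 1)) k (by simpa using h)
  simpa [pvC, List.map_take] using hs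

lemma pvC_lt (parts : List String) : ∀ (b a : Nat), a < b → b ≤ parts.length →
    pvC parts a < pvC parts b := by
  intro b
  induction b with
  | zero => intro a h _; omega
  | succ b ih =>
    intro a hab hb
    have hlen : (0 : Int) ≤ PySem.Str.len parts[b] := by
      simp [PySem.Str.len_eq]
    rw [pvC_succ parts b (by omega)]
    rcases Nat.lt_or_ge a b with h | h
    · have := ih a h (by omega); omega
    · have : a = b := by omega
      subst this; omega

lemma pvC_le (parts : List String) (a b : Nat) (h : a ≤ b) (hb : b ≤ parts.length) :
    pvC parts a ≤ pvC parts b := by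
  rcases Nat.lt_or_ge a b with h' | h'
  · exact le_of_lt (pvC_lt parts b a h' hb)
  · have : a = b := by omega
    subst this; exact le_rfl

-- correctness of the binary search: it returns the unique k with the bracketing properties
lemma pvLastLeAux_eq (parts : List String) (cum : List Int) (n : Nat) (limit : Int)
    (hget : ∀ j, j ≤ n → cum.getD j 0 = pvC parts j) (hn : n ≤ parts.length) :
    ∀ (d lo hi k : Nat), hi - lo ≤ d → lo ≤ k → k ≤ hi → hi ≤ n →
      (pvC parts k ≤ limit ∨ k = lo) → (k < hi → limit < pvC parts (k + 1)) →
      pvLastLeAux cum limit d lo hi = k := by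
  intro d
  induction d with
  | zero =>
    intro lo hi k hd hlok hkhi hhin h1 h2
    have : k = lo := by omega
    subst this
    rfl
  | succ d ih =>
    intro lo hi k hd hlok hkhi hhin h1 h2
    simp only [pvLastLeAux]
    by_cases hlt : lo < hi
    · rw [if_pos hlt]
      set mid := (lo + hi + 1) / 2 with hmid
      have hmid1 : lo < mid := by omega
      have hmid2 : mid ≤ hi := by omega
      rw [hget mid (by omega)]
      by_cases hc : pvC parts mid ≤ limit
      · rw [if_pos hc]
        have hmk : mid ≤ k := by
          by_contra hx
          push_neg at hx
          have hk1 : k + 1 ≤ mid := by omega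
          have : limit < pvC parts (k + 1) := h2 (by omega)
          have : pvC parts (k + 1) ≤ pvC parts mid := pvC_le parts _ _ hk1 (by omega)
          omega
        have h1' : pvC parts k ≤ limit ∨ k = mid := by
          rcases h1 with h | h
          · exact Or.inl h
          · omega
        exact ih mid hi k (by omega) hmk hkhi hhin h1' h2
      · rw [if_neg hc]
        push_neg at hc
        have hkm : k < mid := by
          by_contra hx
          push_neg at hx
          have hCk : pvC parts k ≤ limit := by
            rcases h1 with h | h
            · exact h
            · omega
          have : pvC parts mid ≤ pvC parts k := pvC_le parts _ _ hx (by omega)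
          omega
        exact ih lo (mid - 1) k (by omega) hlok (by omega) (by omega) h1
          (fun h => h2 (by omega))
    · rw [if_neg hlt]
      omega

lemma pvLastLe_eq (parts : List String) (cum : List Int) (n : Nat) (limit : Int)
    (hget : ∀ j, j ≤ n → cum.getD j 0 = pvC parts j) (hn : n ≤ parts.length)
    (lo hi k : Nat) (hlok : lo ≤ k) (hkhi : k ≤ hi) (hhin : hi ≤ n)
    (h1 : pvC parts k ≤ limit ∨ k = lo) (h2 : k < hi → limit < pvC parts (k + 1)) :
    pvLastLe cum limit lo hi = k :=
  pvLastLeAux_eq parts cum n limit hget hn (hi - lo) lo hi k le_rfl hlok hkhi hhin h1 h2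

-- the fuel argument of pvMkBreaksAux is irrelevant once it dominates n - i
lemma pvMkBreaksAux_congr (cum : List Int) (budget : Int) (n : Nat) :
    ∀ (f g i : Nat), n - i ≤ f → n - i ≤ g →
      pvMkBreaksAux cum budget n f i = pvMkBreaksAux cum budget n g i := by
  intro f
  induction f with
  | zero =>
    intro g i hf hg
    cases g with
    | zero => rfl
    | succ g =>
      simp only [pvMkBreaksAux]
      rw [if_neg (show ¬ i < n from by omega)]
  | succ f ih =>
    intro g i hf hg
    by_cases hi : i < n
    · cases g with
      | zero => omega
      | succ g =>
        simp only [pvMkBreaksAux, if_pos hi]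
        congr 1
        exact ih g _ (by omega) (by omega)
    · cases g with
      | zero =>
        simp only [pvMkBreaksAux]
        rw [if_neg hi]
      | succ g => simp only [pvMkBreaksAux, if_neg hi]

lemma pvMkBreaksAux_fuel (cum : List Int) (budget : Int) (n : Nat)
    (f i : Nat) (h : n - i ≤ f) : pvMkBreaksAux cum budget n f i = pvMkBreaks cum budget n i := by
  rw [pvMkBreaks]
  exact pvMkBreaksAux_congr cum budget n f (n - i) i h le_rfl

lemma pvMkBreaks_step (cum : List Int) (budget : Int) (n i : Nat) (h : i < n) :
    pvMkBreaks cum budget n i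
      = (i, max (pvLastLe cum (budget + cum.getD i 0) i n) (i + 1)) ::
        pvMkBreaks cum budget n (max (pvLastLe cum (budget + cum.getD i 0) i n) (i + 1)) := by
  rw [pvMkBreaks, show n - i = (n - i - 1) + 1 from by omega]
  simp only [pvMkBreaksAux, if_pos h]
  rw [pvMkBreaksAux_fuel cum budget n (n - i - 1) _ (by omega)]

lemma pvMkBreaks_stop (cum : List Int) (budget : Int) (n i : Nat) (h : ¬ i < n) :
    pvMkBreaks cum budget n i = [] := by
  rw [pvMkBreaks, show n - i = 0 from by omega]
  rfl

-- the grouping fold over the remaining parts produces exactly the binary-search break slices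
lemma greedy_breaks (prog : String) (parts : List String) (width : Int) (cum : List Int)
    (hget : ∀ j, j ≤ parts.length → cum.getD j 0 = pvC parts j) :
    ∀ (d k i : Nat) (done : List (List String)), parts.length - k ≤ d → i < k → k ≤ parts.length →
      (pvC parts k ≤ (width - PySem.Str.len prog) + pvC parts i ∨ k = i + 1) →
      (let st := (parts.drop k).foldl (pvStep prog width)
          (done, (parts.drop i).take (k - i), PySem.Str.len prog + (pvC parts k - pvC parts i));
       st.1 ++ [st.2.1])
      = done ++ (pvMkBreaks cum (width - PySem.Str.len prog) parts.length i).map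
          (fun b => (parts.drop b.1).take (b.2 - b.1)) := by
  intro d
  induction d with
  | zero =>
    intro k i done hd hik hkn hfit
    have hkn' : k = parts.length := by omega
    subst hkn'
    simp only [List.drop_length, List.foldl_nil]
    rw [pvMkBreaks_step cum _ _ _ hik]
    have hm : max (pvLastLe cum ((width - PySem.Str.len prog) + cum.getD i 0) i parts.length) (i + 1)
        = parts.length := by
      rw [hget i (by omega)]
      rcases hfit with h | h
      · rw [pvLastLe_eq parts cum parts.length _ hget le_rfl i parts.length
          parts.length (by omega) le_rfl le_rfl (Or.inl h) (by omega)]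
        omega
      · by_cases hc : pvC parts parts.length ≤ (width - PySem.Str.len prog) + pvC parts i
        · rw [pvLastLe_eq parts cum parts.length _ hget le_rfl i parts.length
            parts.length (by omega) le_rfl le_rfl (Or.inl hc) (by omega)]
          omega
        · push_neg at hc
          rw [pvLastLe_eq parts cum parts.length _ hget le_rfl i parts.length
            i le_rfl (by omega) le_rfl (Or.inr rfl) (by rw [show i + 1 = parts.length from by omega]; exact fun _ => hc)]
          omega
    rw [hm, pvMkBreaks_stop cum _ _ _ (by omega)]
    simp
  | succ d ih =>
    intro k i done hd hik hkn hfit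
    rcases Nat.eq_or_lt_of_le hkn with hkeq | hklt
    · -- k = parts.length : same as the base case
      subst hkeq
      exact ih parts.length i done (by omega) hik le_rfl hfit
    · have hdrop : parts.drop k = parts[k] :: parts.drop (k + 1) :=
        List.drop_eq_getElem_cons hklt
      have hsucc := pvC_succ parts k hklt
      simp only [hdrop, List.foldl_cons, pvStep]
      by_cases hc : PySem.Str.len prog + (pvC parts k - pvC parts i) + 1 + PySem.Str.len parts[k] ≤ width
      · rw [if_pos hc]
        have hgrp : (parts.drop i).take (k - i) ++ [parts[k]] = (parts.drop i).take (k + 1 - i) := by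
          have hidx : (parts.drop i)[k - i]? = some parts[k] := by
            rw [List.getElem?_drop]
            rw [List.getElem?_eq_getElem (by omega)]
            congr 1
            congr 1
            omega
          rw [show k + 1 - i = (k - i) + 1 from by omega, List.take_succ, hidx]
          simp
        have hcur : PySem.Str.len prog + (pvC parts k - pvC parts i) + 1 + PySem.Str.len parts[k]
            = PySem.Str.len prog + (pvC parts (k + 1) - pvC parts i) := by
          rw [hsucc]; ring
        rw [hgrp, hcur]
        exact ih (k + 1) i done (by omega) (by omega) (by omega) (Or.inl (by omega))
      · rw [if_neg hc]
        have hnofit : (width - PySem.Str.len prog) + pvC parts i < pvC parts (k + 1) := by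
          rw [hsucc]; omega
        have hsng : [parts[k]] = (parts.drop k).take (k + 1 - k) := by
          rw [show k + 1 - k = 1 from by omega, hdrop, List.take_succ_cons, List.take_zero]
        have hcur : PySem.Str.len prog + 1 + PySem.Str.len parts[k]
            = PySem.Str.len prog + (pvC parts (k + 1) - pvC parts k) := by
          rw [hsucc]; ring
        rw [hsng, hcur]
        have := ih (k + 1) k (done ++ [(parts.drop i).take (k - i)]) (by omega) (by omega)
          (by omega) (Or.inr rfl)
        -- the break at i is (i, k)
        have hm : max (pvLastLe cum ((width - PySem.Str.len prog) + cum.getD i 0) i parts.length) (i + 1) = k := by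
          rw [hget i (by omega)]
          by_cases hCk : pvC parts k ≤ (width - PySem.Str.len prog) + pvC parts i
          · rw [pvLastLe_eq parts cum parts.length _ hget le_rfl i parts.length
              k (by omega) (by omega) le_rfl (Or.inl hCk) (fun _ => hnofit)]
            omega
          · have hk1 : k = i + 1 := by tauto
            push_neg at hCk
            rw [pvLastLe_eq parts cum parts.length _ hget le_rfl i parts.length
              i le_rfl (by omega) le_rfl (Or.inr rfl) (by rw [show i + 1 = k from hk1.symm]; exact fun _ => hCk)]
            omega
        rw [this]
        conv_rhs => rw [pvMkBreaks_step cum _ _ _ (by omega : i < parts.length), hm]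
        simp [List.append_assoc]

-- length of " ".join over a nonempty list of strings
lemma join_space_len : ∀ (l : List String), l ≠ [] →
    ((PySem.Str.join " " l).toList.length : Int) = pvC l l.length - 1 := by
  intro l
  induction l with
  | nil => intro h; exact absurd rfl h
  | cons p tl ih =>
    intro _
    cases tl with
    | nil =>
      rw [str_join_singleton]
      simp [pvC, PySem.Str.len_eq]
    | cons q tu =>
      have hjoin : PySem.Str.join " " (p :: q :: tu) = p ++ " " ++ PySem.Str.join " " (q :: tu) := by
        apply String.toList_injective
        simp [PySem.Str.toList_join, PySem.Chars.join_cons_cons]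
      rw [hjoin]
      have := ih (by simp)
      simp only [String.toList_append, List.length_append] at *
      push_cast at *
      have hC : pvC (p :: q :: tu) (p :: q :: tu).length
          = (PySem.Str.len p + 1) + pvC (q :: tu) (q :: tu).length := by
        simp [pvC]
      rw [hC]
      simp [PySem.Str.len_eq] at *
      omega

-- ===== VERDICT (by name: the statement is the Claim_ definition above) =====
lemma getLastD_concat' {α : Type} (d x : α) (xs : List α) : (xs ++ [x]).getLastD d = x := by
  simp

theorem wrap_usage_line_py_spec : Claim_equal_wrap_usage_line_py := by
  intro prog parts width _
  unfold Spec_wrap_usage_line_py wrap_usage_line_py wrap_usage_line_py_alt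
  cases parts with
  | nil => simp
  | cons p0 rest =>
    simp only [List.isEmpty_cons, Bool.false_eq_true, if_false]
    have hcum : (p0 :: rest).foldl (fun acc p => acc ++ [acc.getLastD 0 + PySem.Str.len p + 1]) [0]
        = [0] ++ pvScan 0 (p0 :: rest) := by
      rw [foldl_cum (p0 :: rest) [0] (by simp)]; simp
    have hget : ∀ j, j ≤ (p0 :: rest).length →
        ((p0 :: rest).foldl (fun acc p => acc ++ [acc.getLastD 0 + PySem.Str.len p + 1]) [0]).getD j 0
        = pvC (p0 :: rest) j := by
      intro j hj
      rw [hcum]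
      cases j with
      | zero => simp [pvC]
      | succ j =>
        have hs := pvScan_getD (p0 :: rest) 0 j (by simpa using hj)
        simp only [List.cons_append, List.nil_append, List.getD_cons_succ]
        rw [hs]
        ring
    set cums := (p0 :: rest).foldl (fun acc p => acc ++ [acc.getLastD 0 + PySem.Str.len p + 1]) [0] with hcums
    have hlen1 : PySem.Str.len (prog ++ " " ++ PySem.Str.join " " (p0 :: rest))
        = PySem.Str.len prog + cums.getD (p0 :: rest).length 0 := by
      rw [hget (p0 :: rest).length le_rfl]
      have hj := join_space_len (p0 :: rest) (by simp)
      simp only [PySem.Str.len_eq, String.toList_append, List.length_append]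
      push_cast
      simp at hj ⊢
      omega
    rw [← hlen1]
    by_cases hw : PySem.Str.len (prog ++ " " ++ PySem.Str.join " " (p0 :: rest)) ≤ width
    · rw [if_pos hw, if_pos hw]
    · rw [if_neg hw, if_neg hw]
      set indent := String.ofList (List.replicate (prog.toList.length + 1) ' ') with hindent
      have hind : indent.toList.length = prog.toList.length + 1 := by
        simp [hindent]
      have h0 : (([] : List String), prog ++ " " ++ p0)
          = (pvRender prog indent [], pvLine prog indent [] [p0]) := by
        simp [pvRender, pvLine, str_join_singleton]
      have hcur0 : PySem.Str.len prog + 1 + PySem.Str.len p0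
          = ((pvLine prog indent [] [p0]).toList.length : Int) := by
        simp [pvLine, str_join_singleton, PySem.Str.len_eq]
        push_cast
        ring
      simp only [List.foldl_cons]
      rw [if_pos (Or.inr trivial), h0,
        loop_eq prog indent width hind rest [] [p0] (by simp)]
      have hgroups := greedy_breaks prog (p0 :: rest) width cums hget
        ((p0 :: rest).length - 1) 1 0 [] (by simp) (by omega) (by simp) (Or.inr rfl)
      simp only [List.drop_zero, List.drop_one, List.tail_cons, List.nil_append,
        Nat.sub_zero] at hgroups
      rw [show List.take 1 (p0 :: rest) = [p0] from rfl] at hgroups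
      rw [show PySem.Str.len prog + (pvC (p0 :: rest) 1 - pvC (p0 :: rest) 0)
          = ((pvLine prog indent [] [p0]).toList.length : Int) from by
            rw [← hcur0]; simp [pvC, PySem.Str.len_eq]; ring] at hgroups
      rcases hst : rest.foldl (pvStep prog width)
          ([], [p0], ((pvLine prog indent [] [p0]).toList.length : Int)) with ⟨done', g', cur'⟩
      rw [hst] at hgroups
      simp only [] at hgroups ⊢
      -- hgroups : done' ++ [g'] = (pvMkBreaks …).map slicefn
      cases hbr : pvMkBreaks cums (width - PySem.Str.len prog) (p0 :: rest).length 0 with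
      | nil =>
        rw [hbr] at hgroups
        simp at hgroups
      | cons b0 bs =>
        rw [hbr] at hgroups
        simp only []
        have hB : ((prog ++ " " ++ PySem.Str.join " "
              (PySem.List.slice (p0 :: rest) (some (b0.1 : Int)) (some (b0.2 : Int)))) ::
            bs.map (fun b => indent ++ PySem.Str.join " "
              (PySem.List.slice (p0 :: rest) (some (b.1 : Int)) (some (b.2 : Int)))))
            = pvRender prog indent
                ((b0 :: bs).map (fun b => (((p0 :: rest)).drop b.1).take (b.2 - b.1))) := by
          simp [pvRender, PySem.List.slice_natCast, List.map_map]
        rw [hB, ← hgroups, pvRender_append]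
        simp only [getLastD_concat', List.dropLast_concat]
        rcases eq_or_ne (PySem.Str.strip (pvLine prog indent done' g')) "" with he | he
        · rw [if_neg (fun hne => hne he), if_pos he]
        · rw [if_pos he, if_neg he]
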